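-- pv_equiv track=rewrite | github.com/Nishanka06/playfair-cipher | gui.py | heuristic_clean
-- ===== SOURCE A (Python) =====
-- def heuristic_clean(text: str) -> str:
--     if text.endswith('X'):
--         text = text[:-1]
--     out_chars = []
--     i = 0
--     n = len(text)
--     while i < n:
--         if i + 2 < n and text[i+1] == 'X' and text[i] == text[i+2]:
--             out_chars.append(text[i])
--             i += 3
--         else:
--             out_chars.append(text[i])
--             i += 1
--     return ''.join(out_chars)
-- ===== SOURCE B (Python) =====
-- def heuristic_clean(text: str) -> str:
--     if text.endswith('X'):
--         text = text[:-1]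
--     n = len(text)
--     parts = []
--     i = 0   # start of the not-yet-copied region
--     p = 1   # next candidate position for the middle 'X' of an aXa triple
--     while True:
--         j = text.find('X', p)
--         if j == -1 or j + 1 >= n:
--             parts.append(text[i:])
--             break
--         if text[j - 1] == text[j + 1]:
--             parts.append(text[i:j])
--             i = j + 2
--             p = j + 3
--         else:
--             p = j + 1
--     return ''.join(parts)
-- ===== Notes on version B (the rewrite author's own statement) =====
-- stated objective: faster
-- what changed: A walks the string index by index testing every position for a collapsible padded triple; B jumps directly between occurrences of the padding character with str.find and copies whole untouched slices between matches.
import Mathlib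
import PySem

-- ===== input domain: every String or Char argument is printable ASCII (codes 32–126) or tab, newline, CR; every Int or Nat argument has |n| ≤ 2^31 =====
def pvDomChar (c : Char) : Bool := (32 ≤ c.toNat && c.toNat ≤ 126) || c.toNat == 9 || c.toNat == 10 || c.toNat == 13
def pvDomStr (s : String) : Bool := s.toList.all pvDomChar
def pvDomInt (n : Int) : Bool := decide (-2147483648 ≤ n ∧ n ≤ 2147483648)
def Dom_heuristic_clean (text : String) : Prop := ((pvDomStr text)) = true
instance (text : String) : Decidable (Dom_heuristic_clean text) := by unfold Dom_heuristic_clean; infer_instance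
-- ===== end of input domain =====

-- B replaces A's one-by-one index walk by jumping between padding-character positions with
-- str.find and copying whole untouched slices between matches (objective: faster, by the
-- constant factor of C-level find/slice; measured).

-- ===== PORT A =====
-- A's while-loop over index i, with a fuel argument that only makes the recursion structural
-- (cs.length is enough fuel: i grows by at least 1 each iteration). Every index access is guarded
-- by 'i < n' / 'i + 2 < n', so the in-range Python indexing text[i] is List.getD (exact there).
def pvLoopA (cs : List Char) : Nat → Nat → List Char
  | 0, _ => []
  | fuel+1, i =>
    if i < cs.length then
      if i + 2 < cs.length ∧ cs.getD (i+1) ' ' = 'X' ∧ cs.getD i ' ' = cs.getD (i+2) ' ' then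
        cs.getD i ' ' :: pvLoopA cs fuel (i+3)
      else
        cs.getD i ' ' :: pvLoopA cs fuel (i+1)
    else []

def heuristic_clean (text : String) : String :=
  let cs := if PySem.Str.endswith text "X" then PySem.List.slice text.toList none (some (-1)) else text.toList
  String.ofList (pvLoopA cs cs.length 0)

-- ===== PORT B =====
-- B's loop: i = start of the uncopied region, p = next candidate middle position;
-- j = text.find('X', p) is PySem.Chars.findFrom. The fuel argument only makes the recursion
-- structural (p grows by at least 1 each iteration and the loop exits once p > len, so
-- cs.length + 1 is enough fuel; the fuel-0 value is never reached from the entry point).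
def pvLoopB (cs : List Char) : Nat → Nat → Nat → List Char
  | 0, i, _ => PySem.List.slice cs (some (i : Int)) none
  | fuel+1, i, p =>
    let j := PySem.Chars.findFrom cs ['X'] (p : Int) none
    if j = -1 ∨ (cs.length : Int) ≤ j + 1 then
      PySem.List.slice cs (some (i : Int)) none
    else if cs.getD (j.toNat - 1) ' ' = cs.getD (j.toNat + 1) ' ' then
      PySem.List.slice cs (some (i : Int)) (some j) ++ pvLoopB cs fuel (j.toNat + 2) (j.toNat + 3)
    else
      pvLoopB cs fuel i (j.toNat + 1)

def heuristic_clean_alt (text : String) : String :=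
  let cs := if PySem.Str.endswith text "X" then PySem.List.slice text.toList none (some (-1)) else text.toList
  String.ofList (pvLoopB cs (cs.length + 1) 0 1)

-- ===== PRECONDITION & SPEC =====
def Spec_heuristic_clean (text : String) (out : String) : Prop := out = heuristic_clean_alt text
instance (text : String) (out : String) : Decidable (Spec_heuristic_clean text out) := by unfold Spec_heuristic_clean; infer_instance

-- ===== CLAIM (what is proved, stated in full; the proofs are below) =====
def Claim_equal_heuristic_clean : Prop := ∀ (text : String), Dom_heuristic_clean text → Spec_heuristic_clean text (heuristic_clean text)

-- ===== LEMMAS AND PROOFS =====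

-- text.find('X', p) is -1 once p is past the end
theorem pvFindFrom_gt_len (cs : List Char) (p : Nat) (h : cs.length < p) :
    PySem.Chars.findFrom cs ['X'] (p:Int) none = -1 := by
  simp only [PySem.Chars.findFrom]
  split_ifs with h1 h2 h3 <;> omega

-- 'm is the middle of a collapsible aXa triple' (the condition A tests at position m-1)
def pvCond (cs : List Char) (m : Nat) : Prop :=
  m + 1 < cs.length ∧ cs.getD m ' ' = 'X' ∧ cs.getD (m-1) ' ' = cs.getD (m+1) ' '

theorem pvPrefixX_iff (cs : List Char) (m : Nat) (h : m < cs.length) :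
    (['X'] <+: cs.drop m) ↔ cs[m] = 'X' := by
  rw [List.drop_eq_getElem_cons h]
  constructor
  · rintro ⟨t, ht⟩
    have h2 : cs[m]? = some 'X' := by simpa using (congrArg (·.head?) ht.symm)
    rw [List.getElem?_eq_getElem h] at h2
    exact Option.some.inj h2
  · intro hx; exact ⟨List.drop (m+1) cs, by rw [hx]; rfl⟩

theorem pvLoopA_stop (cs : List Char) (f i : Nat) (h : cs.length ≤ i) : pvLoopA cs f i = [] := by
  cases f with
  | zero => rfl
  | succ f => rw [pvLoopA]; simp [Nat.not_lt.2 h]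

-- the result does not depend on the fuel once the fuel is sufficient
theorem pvLoopA_fuel (cs : List Char) : ∀ f g i, cs.length - i ≤ f → cs.length - i ≤ g →
    pvLoopA cs f i = pvLoopA cs g i := by
  intro f
  induction f with
  | zero => intro g i hf _; rw [pvLoopA_stop cs 0 i (by omega), pvLoopA_stop cs g i (by omega)]
  | succ f ih =>
    intro g i hf hg
    by_cases hi : i < cs.length
    · obtain ⟨g', rfl⟩ : ∃ g', g = g' + 1 := ⟨g - 1, by omega⟩
      rw [pvLoopA, pvLoopA]
      by_cases hc : i + 2 < cs.length ∧ cs.getD (i+1) ' ' = 'X' ∧ cs.getD i ' ' = cs.getD (i+2) ' '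
      · rw [if_pos hi, if_pos hi, if_pos hc, if_pos hc, ih g' (i+3) (by omega) (by omega)]
      · rw [if_pos hi, if_pos hi, if_neg hc, if_neg hc, ih g' (i+1) (by omega) (by omega)]
    · rw [pvLoopA_stop cs _ i (by omega), pvLoopA_stop cs g i (by omega)]

-- A copies characters one by one through a region containing no triple middle
theorem pvLoopA_copy (cs : List Char) (d : Nat) : ∀ i f g, cs.length - i ≤ f →
    cs.length - (i + d) ≤ g → (∀ m, i+1 ≤ m → m < i+1+d → ¬ pvCond cs m) →
    pvLoopA cs f i = (cs.drop i).take d ++ pvLoopA cs g (i+d) := by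
  induction d with
  | zero => intro i f g hf hg _; simpa using pvLoopA_fuel cs f g i hf (by omega)
  | succ d ih =>
    intro i f g hf hg hm
    by_cases hi : i < cs.length
    · obtain ⟨f', rfl⟩ : ∃ f', f = f' + 1 := ⟨f - 1, by omega⟩
      have hc : ¬ (i + 2 < cs.length ∧ cs.getD (i+1) ' ' = 'X' ∧ cs.getD i ' ' = cs.getD (i+2) ' ') := by
        have := hm (i+1) le_rfl (by omega)
        simpa [pvCond, Nat.add_sub_cancel] using this
      rw [pvLoopA, if_pos hi, if_neg hc]
      rw [ih (i+1) f' g (by omega) (by omega) (fun m h1 h2 => hm m (by omega) (by omega))]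
      rw [List.getD_eq_getElem cs ' ' hi,
        show List.drop i cs = cs[i] :: List.drop (i+1) cs from List.drop_eq_getElem_cons hi,
        List.take_succ_cons, show i + 1 + d = i + (d + 1) from by omega]
      simp
    · rw [pvLoopA_stop cs f i (by omega), pvLoopA_stop cs g (i+(d+1)) (by omega),
        List.drop_eq_nil_of_le (by omega : cs.length ≤ i)]
      simp
-- A consumes everything once no triple middle remains
theorem pvLoopA_drop (cs : List Char) (i f : Nat) (hf : cs.length - i ≤ f)
    (h : ∀ m, i+1 ≤ m → ¬ pvCond cs m) : pvLoopA cs f i = cs.drop i := by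
  have := pvLoopA_copy cs (cs.length - i) i f 0 hf (by omega) (fun m h1 _ => h m h1)
  rw [this, pvLoopA_stop cs 0 _ (by omega)]
  simp

-- the main invariant: B's state (i, p) with no triple middle in [i+1, p) computes A's tail from i
theorem pvLoopB_eq (cs : List Char) : ∀ fuel p i f, cs.length + 1 - p ≤ fuel →
    cs.length - i ≤ f → i < p →
    (∀ m, i+1 ≤ m → m < p → ¬ pvCond cs m) → pvLoopB cs fuel i p = pvLoopA cs f i := by
  intro fuel
  induction fuel with
  | zero =>
    intro p i f h0 hfA hip hinv
    rw [pvLoopB, PySem.List.slice_from_natCast]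
    refine (pvLoopA_drop cs i f hfA ?_).symm
    intro m h1 hcond
    by_cases hmp : m < p
    · exact hinv m h1 hmp hcond
    · exact absurd hcond.1 (by omega)
  | succ fuel ih =>
    intro p i f hfuel hfA hip hinv
    rw [pvLoopB]
    by_cases hg : PySem.Chars.findFrom cs ['X'] (p : Int) none = -1 ∨
        (cs.length : Int) ≤ PySem.Chars.findFrom cs ['X'] (p : Int) none + 1
    · rw [if_pos hg, PySem.List.slice_from_natCast]
      refine (pvLoopA_drop cs i f hfA ?_).symm
      intro m h1 hcond
      by_cases hmp : m < p
      · exact hinv m h1 hmp hcond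
      · obtain ⟨hlen, hX, _⟩ := hcond
        have hmlt : m < cs.length := by omega
        have hple : p ≤ cs.length := by omega
        have hXe : cs[m] = 'X' := by rw [List.getD_eq_getElem cs ' ' hmlt] at hX; exact hX
        have hpref : ['X'] <+: cs.drop m := (pvPrefixX_iff cs m hmlt).2 hXe
        by_cases hne : PySem.Chars.findFrom cs ['X'] (p : Int) none = -1
        · have hni := (PySem.Chars.findFrom_natCast_eq_neg_one_iff cs ['X'] p hple).1 hne
          apply hni
          have hsuf : cs.drop m <:+ cs.drop p := by
            have hd : cs.drop m = (cs.drop p).drop (m - p) := by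
              rw [List.drop_drop]; congr 1; omega
            rw [hd]; exact List.drop_suffix _ _
          exact hpref.isInfix.trans hsuf.isInfix
        · obtain ⟨hpj, hpre, hmin⟩ := PySem.Chars.findFrom_natCast_spec cs ['X'] p hple hne
          rcases hg with hg | hg
          · exact hne hg
          · by_cases hmj : m < (PySem.Chars.findFrom cs ['X'] (p : Int) none).toNat
            · exact hmin m (by omega) hmj hpref
            · omega
    · rw [if_neg hg]
      rcases not_or.1 hg with ⟨hne, hlt⟩
      have hple : p ≤ cs.length := by
        by_contra hc
        exact hne (pvFindFrom_gt_len cs p (by omega))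
      obtain ⟨hpj, hpre, hmin⟩ := PySem.Chars.findFrom_natCast_spec cs ['X'] p hple hne
      set jn := (PySem.Chars.findFrom cs ['X'] (p : Int) none).toNat with hjndef
      have hjn : (jn : Int) = PySem.Chars.findFrom cs ['X'] (p : Int) none :=
        Int.toNat_of_nonneg (le_trans (Int.natCast_nonneg p) hpj)
      have hpjn : p ≤ jn := by omega
      have hjlt : jn + 1 < cs.length := by omega
      have hXj : cs[jn]'(by omega) = 'X' := (pvPrefixX_iff cs jn (by omega)).1 hpre
      have noMid : ∀ m, p ≤ m → m < jn → ¬ cs.getD m ' ' = 'X' := by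
        intro m h1 h2 hX
        exact hmin m h1 h2 ((pvPrefixX_iff cs m (by omega)).2
          (by rw [← List.getD_eq_getElem cs ' ' (by omega : m < cs.length)]; exact hX))
      have notBefore : ∀ m, i+1 ≤ m → m < jn → ¬ pvCond cs m := by
        intro m h1 h2 hcond
        by_cases hmp : m < p
        · exact hinv m h1 hmp hcond
        · exact noMid m (by omega) h2 hcond.2.1
      by_cases hEq : cs.getD (jn - 1) ' ' = cs.getD (jn + 1) ' '
      · rw [if_pos hEq]
        have hij : i + 1 ≤ jn := by omega
        have hcopy := pvLoopA_copy cs (jn - 1 - i) i f (f+1) hfA (by omega)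
          (fun m h1 h2 => notBefore m h1 (by omega))
        rw [show i + (jn - 1 - i) = jn - 1 from by omega] at hcopy
        have hstep : pvLoopA cs (f+1) (jn - 1) = cs.getD (jn-1) ' ' :: pvLoopA cs f (jn + 2) := by
          rw [pvLoopA, if_pos (show jn - 1 < cs.length by omega), if_pos ?_]
          · rw [show jn - 1 + 3 = jn + 2 from by omega]
          · refine ⟨by omega, ?_, ?_⟩
            · rw [show jn - 1 + 1 = jn from by omega,
                List.getD_eq_getElem cs ' ' (show jn < cs.length by omega)]
              exact hXj
            · rw [show jn - 1 + 2 = jn + 1 from by omega]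
              exact hEq
        rw [hcopy, hstep,
          ← ih (jn+3) (jn+2) f (by omega) (by omega) (by omega)
            (fun m h1 h2 => absurd (h1.trans_lt h2) (by omega)),
          ← hjn, PySem.List.slice_natCast]
        have htake : (cs.drop i).take (jn - i)
            = (cs.drop i).take (jn - 1 - i) ++ [cs[jn-1]'(by omega)] := by
          rw [show jn - i = (jn - 1 - i) + 1 from by omega, List.take_add_one]
          congr 1
          rw [List.getElem?_drop, show i + (jn - 1 - i) = jn - 1 from by omega,
            List.getElem?_eq_getElem (by omega)]
          rfl
        rw [htake, List.append_assoc,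
          List.getD_eq_getElem cs ' ' (show jn - 1 < cs.length by omega)]
        rfl
      · rw [if_neg hEq]
        apply ih (jn+1) i f (by omega) hfA (by omega)
        intro m h1 h2 hcond
        by_cases hmp : m < p
        · exact hinv m h1 hmp hcond
        · by_cases hmj : m < jn
          · exact noMid m (by omega) hmj hcond.2.1
          · have hm : m = jn := by omega
            rw [hm] at hcond
            exact hEq hcond.2.2

-- ===== VERDICT (by name: the statement is the Claim_ definition above) =====
theorem heuristic_clean_spec : Claim_equal_heuristic_clean := by
  have key : ∀ cs : List Char, pvLoopB cs (cs.length + 1) 0 1 = pvLoopA cs cs.length 0 := fun cs =>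
    pvLoopB_eq cs (cs.length + 1) 1 0 cs.length (by omega) (by omega) Nat.one_pos
      (fun m h1 h2 => absurd (h1.trans_lt h2) (by omega))
  intro text _
  show String.ofList (pvLoopA (if PySem.Str.endswith text "X" = true then PySem.List.slice text.toList none (some (-1)) else text.toList) (if PySem.Str.endswith text "X" = true then PySem.List.slice text.toList none (some (-1)) else text.toList).length 0)
      = String.ofList (pvLoopB (if PySem.Str.endswith text "X" = true then PySem.List.slice text.toList none (some (-1)) else text.toList) ((if PySem.Str.endswith text "X" = true then PySem.List.slice text.toList none (some (-1)) else text.toList).length + 1) 0 1)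
  rw [key]
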